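-- pv_equiv track=rewrite | github.com/HaoranLiu14/BugSum | SalientSentenceSelection/SalientSentenceSelection.py | GenFullTVec
-- ===== SOURCE A (Python) =====
-- def VecAdd(Veca, Vecb):
--     VecLen = len(Veca)
--     answerList = []
--     for i in range(VecLen):
--         answerList.append(Veca[i]+Vecb[i])
--     return answerList
--
-- def GenFullTVec(senVecList, buildInfoMark):
--     vecLen = len(senVecList[0])
--     FullTVec = []
--     for i in range(vecLen):
--         FullTVec.append(0)
--     senVecListNum = len(senVecList)
--     for inum in range(senVecListNum):
--         i=senVecList[inum]
--         if (buildInfoMark[inum]!=1):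
--             FullTVec = VecAdd(FullTVec, i)
--     return FullTVec
-- ===== SOURCE B (Python) =====
-- def GenFullTVec(senVecList, buildInfoMark):
--     # column-major: each output coordinate is an independent sum over the kept sentences
--     n = len(senVecList)
--     return [sum((senVecList[inum][i] for inum in range(n) if buildInfoMark[inum] != 1), 0)
--             for i in range(len(senVecList[0]))]
-- ===== Notes on version B (the rewrite author's own statement) =====
-- stated objective: simpler
-- what changed: Replaces the row-major accumulation (a zero vector repeatedly rebuilt by VecAdd) with a column-major comprehension computing each coordinate's sum independently; VecAdd and the intermediate vectors disappear.
import Mathlib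
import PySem

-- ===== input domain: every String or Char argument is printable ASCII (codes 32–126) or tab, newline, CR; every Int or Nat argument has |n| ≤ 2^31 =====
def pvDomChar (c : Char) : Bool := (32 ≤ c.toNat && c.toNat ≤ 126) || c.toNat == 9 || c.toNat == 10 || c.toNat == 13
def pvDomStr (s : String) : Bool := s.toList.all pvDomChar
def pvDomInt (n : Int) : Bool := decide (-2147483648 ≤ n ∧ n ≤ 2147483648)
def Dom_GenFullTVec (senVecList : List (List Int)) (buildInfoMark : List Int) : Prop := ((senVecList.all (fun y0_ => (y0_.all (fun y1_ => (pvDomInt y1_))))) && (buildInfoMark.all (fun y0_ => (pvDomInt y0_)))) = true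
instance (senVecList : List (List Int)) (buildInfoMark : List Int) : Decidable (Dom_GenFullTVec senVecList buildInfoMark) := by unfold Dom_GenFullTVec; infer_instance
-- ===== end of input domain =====

-- B computes each coordinate independently (column-major) instead of A's row-major VecAdd accumulation; objective: simpler.

-- ===== PORT A =====
-- indexing is totalized with getD 0 / headD []; exact because Pre_ keeps every index Python uses in range
def VecAddPort (a b : List Int) : List Int :=
  (List.range a.length).foldl (fun acc i => acc ++ [a.getD i 0 + b.getD i 0]) []

def GenFullTVec (senVecList : List (List Int)) (buildInfoMark : List Int) : List Int :=
  let vecLen := (senVecList.headD []).length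
  let full0 := (List.range vecLen).foldl (fun acc _ => acc ++ [(0 : Int)]) []
  (List.range senVecList.length).foldl (fun full inum =>
    let i := senVecList.getD inum []
    if buildInfoMark.getD inum 0 != 1 then VecAddPort full i else full) full0

-- ===== PORT B =====
def GenFullTVec_alt (senVecList : List (List Int)) (buildInfoMark : List Int) : List Int :=
  (List.range (senVecList.headD []).length).map (fun i =>
    (((List.range senVecList.length).filter (fun inum => buildInfoMark.getD inum 0 != 1)).map
      (fun inum => (senVecList.getD inum []).getD i 0)).sum)

-- ===== PRECONDITION & SPEC =====
-- Pre_ excludes exactly the inputs on which A raises IndexError: empty senVecList,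
-- buildInfoMark shorter than senVecList, or a kept sentence vector shorter than senVecList[0].
def Pre_GenFullTVec (senVecList : List (List Int)) (buildInfoMark : List Int) : Prop :=
  senVecList ≠ [] ∧ senVecList.length ≤ buildInfoMark.length ∧
  ∀ inum, inum < senVecList.length → buildInfoMark.getD inum 0 ≠ 1 →
    (senVecList.headD []).length ≤ (senVecList.getD inum []).length
instance (senVecList : List (List Int)) (buildInfoMark : List Int) : Decidable (Pre_GenFullTVec senVecList buildInfoMark) := by unfold Pre_GenFullTVec; infer_instance

def pvWitness_GenFullTVec : List (List Int) × List Int := ([[1, 2], [3, 4], [5, 6]], [0, 1, 0])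

def Spec_GenFullTVec (senVecList : List (List Int)) (buildInfoMark : List Int) (out : List Int) : Prop := out = GenFullTVec_alt senVecList buildInfoMark
instance (senVecList : List (List Int)) (buildInfoMark : List Int) (out : List Int) : Decidable (Spec_GenFullTVec senVecList buildInfoMark out) := by unfold Spec_GenFullTVec; infer_instance

-- ===== CLAIM (what is proved, stated in full; the proofs are below) =====
def Claim_equal_GenFullTVec : Prop := ∀ (senVecList : List (List Int)) (buildInfoMark : List Int), Dom_GenFullTVec senVecList buildInfoMark → Pre_GenFullTVec senVecList buildInfoMark → Spec_GenFullTVec senVecList buildInfoMark (GenFullTVec senVecList buildInfoMark)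

-- ===== LEMMAS AND PROOFS =====

lemma map_range_getD (acc : List Int) : (List.range acc.length).map (fun i => acc.getD i 0) = acc := by
  apply List.ext_getElem
  · simp
  · intro i h1 h2
    simp at h1 ⊢
    simp [List.getD_eq_getElem?_getD, List.getElem?_eq_getElem h1]

lemma getD_map_range' {α : Type} [Inhabited α] (f : Nat → α) {i n : Nat} (hi : i < n) (d : α) :
    ((List.range n).map f).getD i d = f i := by
  rw [List.getD_eq_getElem?_getD, List.getElem?_map]
  simp [List.getElem?_range hi]

lemma vecAdd_eq_map (a b : List Int) :
    VecAddPort a b = (List.range a.length).map (fun i => a.getD i 0 + b.getD i 0) := by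
  show (List.range a.length).foldl _ [] = _
  rw [PySem.List.foldl_append_singleton_eq_map]
  simp

-- column sum of the kept rows of l, written with an if (A's shape)
def colW (s : List (List Int)) (m : List Int) (l : List Nat) (i : Nat) : Int :=
  (l.map (fun inum => if m.getD inum 0 != 1 then (s.getD inum []).getD i 0 else 0)).sum

lemma colW_eq_filter (s : List (List Int)) (m : List Int) (l : List Nat) (i : Nat) :
    colW s m l i =
      ((l.filter (fun inum => m.getD inum 0 != 1)).map (fun inum => (s.getD inum []).getD i 0)).sum := by
  induction l with
  | nil => rfl
  | cons a l ih =>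
    cases hB : (m.getD a 0 != 1) with
    | false =>
      simp only [colW, List.map_cons, List.sum_cons, List.filter_cons, hB,
        Bool.false_eq_true, if_false, zero_add] at *
      exact ih
    | true =>
      simp only [colW, List.map_cons, List.sum_cons, List.filter_cons, hB,
        eq_self_iff_true, if_true] at *
      rw [ih]

lemma loopA (s : List (List Int)) (m : List Int) (l : List Nat) (acc : List Int) :
    l.foldl (fun full inum =>
        let i := s.getD inum []
        if m.getD inum 0 != 1 then VecAddPort full i else full) acc
    = (List.range acc.length).map (fun i => acc.getD i 0 + colW s m l i) := by
  induction l generalizing acc with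
  | nil =>
    simp only [List.foldl_nil, colW, List.map_nil, List.sum_nil, add_zero]
    exact (map_range_getD acc).symm
  | cons a l ih =>
    have step : (if m.getD a 0 != 1 then VecAddPort acc (s.getD a []) else acc)
        = (List.range acc.length).map
            (fun i => acc.getD i 0 + (if m.getD a 0 != 1 then (s.getD a []).getD i 0 else 0)) := by
      cases hB : (m.getD a 0 != 1) with
      | false =>
        simp only [hB, Bool.false_eq_true, if_false, add_zero]
        exact (map_range_getD acc).symm
      | true =>
        simp only [hB, eq_self_iff_true, if_true]
        exact vecAdd_eq_map acc (s.getD a [])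
    simp only [List.foldl_cons]
    rw [step, ih]
    simp only [List.length_map, List.length_range]
    apply List.map_congr_left
    intro i hi
    simp only [List.mem_range] at hi
    rw [getD_map_range' _ hi]
    simp only [colW, List.map_cons, List.sum_cons]
    ring

lemma full0_eq (n : Nat) :
    (List.range n).foldl (fun acc _ => acc ++ [(0 : Int)]) [] = (List.range n).map (fun _ => (0 : Int)) := by
  simp [PySem.List.foldl_append_singleton_eq_map]

-- ===== VERDICT (by name: the statement is the Claim_ definition above) =====
theorem GenFullTVec_spec : Claim_equal_GenFullTVec := by
  intro s m _ _
  show GenFullTVec s m = GenFullTVec_alt s m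
  unfold GenFullTVec GenFullTVec_alt
  simp only [full0_eq, loopA]
  simp only [List.length_map, List.length_range]
  apply List.map_congr_left
  intro i hi
  simp only [List.mem_range] at hi
  rw [getD_map_range' _ hi]
  simp [colW_eq_filter]
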